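-- pv_equiv track=rewrite | github.com/HsiangHung/Code-Challenges | leetcode_solution/DFS/#296.Best_Meeting_Point.py | distance_change
-- ===== SOURCE A (Python) =====
-- def distance_change(x1, x2, y1, y2, people):
--     '''
--     find relative total change in distance by moving (x1, y1) -> (x2, y2)
--     '''
--     dx, dy = x2 - x1, y2 - y1
--
--     d_dist = 0
--     for px, py in people:
--
--         if dx > 0:
--             if x2 <= px:
--                 d_dist -= dx
--             elif x1 >= px:
--                 d_dist +=  dx
--         elif dx < 0:
--             if x2 >= px:
--                 d_dist -= abs(dx)
--             elif x1 <= px: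
--                 d_dist += abs(dx)
--
--         if dy > 0:
--             if y2 <= py:
--                 d_dist -= dy
--             elif y1 >= py:
--                 d_dist += dy
--         elif dy < 0:
--             if y2 >= py:
--                 d_dist -= abs(dy)
--             elif y1 <= py:
--                 d_dist += abs(dy)
--
--     return d_dist
-- ===== SOURCE B (Python) =====
-- # Sort-then-binary-search: sort each coordinate once, locate the boundaries
-- # x1,x2 (resp. y1,y2) by hand-written bisection, and combine the four
-- # positions in closed form per axis.
--
-- def _bisect_left(a, v):
--     lo, hi = 0, len(a)
--     while lo < hi:
--         mid = (lo + hi) // 2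
--         if a[mid] < v:
--             lo = mid + 1
--         else:
--             hi = mid
--     return lo
--
-- def _bisect_right(a, v):
--     lo, hi = 0, len(a)
--     while lo < hi:
--         mid = (lo + hi) // 2
--         if v < a[mid]:
--             hi = mid
--         else:
--             lo = mid + 1
--     return lo
--
-- def _axis(a1, a2, arr, n):
--     d = a2 - a1
--     if d > 0:
--         return d * (_bisect_right(arr, a1) - (n - _bisect_left(arr, a2)))
--     if d < 0:
--         return (-d) * ((n - _bisect_left(arr, a1)) - _bisect_right(arr, a2))
--     return 0
--
-- def distance_change(x1, x2, y1, y2, people):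
--     xs = sorted(p[0] for p in people)
--     ys = sorted(p[1] for p in people)
--     n = len(people)
--     return _axis(x1, x2, xs, n) + _axis(y1, y2, ys, n)
-- ===== Notes on version B (the rewrite author's own statement) =====
-- stated objective: alternative
-- what changed: Replaces A's single pass that accumulates a per-person conditional delta with a sort-then-binary-search algorithm: each coordinate list is sorted once, the four boundaries x1,x2,y1,y2 are located by hand-written bisection, and each axis contribution is a closed-form expression in those positions.
import Mathlib
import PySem

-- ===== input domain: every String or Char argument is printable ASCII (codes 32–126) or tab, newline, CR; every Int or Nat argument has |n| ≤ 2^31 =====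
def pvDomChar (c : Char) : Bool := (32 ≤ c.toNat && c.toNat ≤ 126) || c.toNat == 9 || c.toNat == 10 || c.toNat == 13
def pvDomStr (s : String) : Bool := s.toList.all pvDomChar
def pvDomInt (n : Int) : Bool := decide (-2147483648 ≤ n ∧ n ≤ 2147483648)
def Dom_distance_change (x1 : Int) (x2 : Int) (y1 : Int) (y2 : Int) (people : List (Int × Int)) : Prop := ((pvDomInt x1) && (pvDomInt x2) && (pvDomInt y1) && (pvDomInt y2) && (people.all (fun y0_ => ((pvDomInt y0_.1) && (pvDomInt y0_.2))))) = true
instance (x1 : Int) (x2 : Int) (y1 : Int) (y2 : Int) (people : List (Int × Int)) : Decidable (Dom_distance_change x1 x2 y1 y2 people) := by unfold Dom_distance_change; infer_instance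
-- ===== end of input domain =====

-- B replaces A's per-person conditional delta accumulation by sorting each
-- coordinate once and locating the boundaries by bisection (objective:
-- alternative algorithm, not faster).

-- ===== PORT A =====
-- A's per-person update for one axis (the x-block / y-block of A's loop body).
def pvAxisStep (a1 : Int) (a2 : Int) (d : Int) (p : Int) : Int :=
  if a2 - a1 > 0 then
    (if a2 ≤ p then d - (a2 - a1) else if a1 ≥ p then d + (a2 - a1) else d)
  else if a2 - a1 < 0 then
    (if a2 ≥ p then d - |a2 - a1| else if a1 ≤ p then d + |a2 - a1| else d)
  else d

def distance_change (x1 : Int) (x2 : Int) (y1 : Int) (y2 : Int) (people : List (Int × Int)) : Int :=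
  people.foldl (fun d p => pvAxisStep y1 y2 (pvAxisStep x1 x2 d p.1) p.2) 0

-- ===== PORT B =====
-- Source B's hand-written _bisect_left/_bisect_right are exactly the standard
-- bisect loops, which is what PySem.List.bisectLeft / bisectRight compute
-- step for step; Source B's local d = a2 - a1 is written inline.
def pvAxisB (a1 : Int) (a2 : Int) (arr : List Int) (n : Int) : Int :=
  if a2 - a1 > 0 then
    (a2 - a1) * ((PySem.List.bisectRight arr a1 : Int) - (n - (PySem.List.bisectLeft arr a2 : Int)))
  else if a2 - a1 < 0 then
    (-(a2 - a1)) * ((n - (PySem.List.bisectLeft arr a1 : Int)) - (PySem.List.bisectRight arr a2 : Int))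
  else 0

def distance_change_alt (x1 : Int) (x2 : Int) (y1 : Int) (y2 : Int) (people : List (Int × Int)) : Int :=
  let xs := PySem.List.sorted (people.map (fun p => p.1)) (fun v => v) false
  let ys := PySem.List.sorted (people.map (fun p => p.2)) (fun v => v) false
  let n : Int := people.length
  pvAxisB x1 x2 xs n + pvAxisB y1 y2 ys n

-- ===== PRECONDITION & SPEC =====
def Spec_distance_change (x1 : Int) (x2 : Int) (y1 : Int) (y2 : Int) (people : List (Int × Int)) (out : Int) : Prop := out = distance_change_alt x1 x2 y1 y2 people
instance (x1 : Int) (x2 : Int) (y1 : Int) (y2 : Int) (people : List (Int × Int)) (out : Int) : Decidable (Spec_distance_change x1 x2 y1 y2 people out) := by unfold Spec_distance_change; infer_instance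

-- ===== CLAIM =====
def Claim_equal_distance_change : Prop := ∀ (x1 : Int) (x2 : Int) (y1 : Int) (y2 : Int) (people : List (Int × Int)), Dom_distance_change x1 x2 y1 y2 people → Spec_distance_change x1 x2 y1 y2 people (distance_change x1 x2 y1 y2 people)

-- ===== LEMMAS AND PROOFS =====

-- A's per-point delta for one axis.
def pvDelta (a1 : Int) (a2 : Int) (p : Int) : Int := pvAxisStep a1 a2 0 p

-- A's step is linear in the accumulator.
theorem pvAxisStep_linear (a1 a2 d p : Int) :
    pvAxisStep a1 a2 d p = d + pvDelta a1 a2 p := by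
  unfold pvDelta pvAxisStep
  split_ifs <;> ring1

-- A's interleaved loop is the sum of the per-point deltas.
theorem pvFold_eq_sum (x1 x2 y1 y2 : Int) :
    ∀ (ps : List (Int × Int)) (d : Int),
      ps.foldl (fun d p => pvAxisStep y1 y2 (pvAxisStep x1 x2 d p.1) p.2) d
        = d + (ps.map (fun p => pvDelta x1 x2 p.1 + pvDelta y1 y2 p.2)).sum := by
  intro ps
  induction ps with
  | nil => intro d; simp
  | cons p ps ih =>
    intro d
    simp only [List.foldl_cons, List.map_cons, List.sum_cons]
    rw [ih, pvAxisStep_linear x1 x2 d p.1, pvAxisStep_linear y1 y2 _ p.2]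
    ring

-- A sum of pairwise deltas splits into the two coordinate sums.
theorem pvSum_split (x1 x2 y1 y2 : Int) (ps : List (Int × Int)) :
    (ps.map (fun p => pvDelta x1 x2 p.1 + pvDelta y1 y2 p.2)).sum
      = ((ps.map (fun p => p.1)).map (pvDelta x1 x2)).sum
        + ((ps.map (fun p => p.2)).map (pvDelta y1 y2)).sum := by
  induction ps with
  | nil => simp
  | cons p ps ih => simp only [List.map_cons, List.sum_cons]; rw [ih]; ring

-- If a predicate holds exactly on the first r positions of a list, countP is r.
theorem countP_eq_of_split (l : List Int) (p : Int → Bool) (r : Nat) (hr : r ≤ l.length)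
    (h1 : ∀ (j : Nat) (hj : j < l.length), j < r → p l[j] = true)
    (h2 : ∀ (j : Nat) (hj : j < l.length), r ≤ j → p l[j] = false) :
    l.countP p = r := by
  have hsplit : l = l.take r ++ l.drop r := (List.take_append_drop r l).symm
  have hlt : (l.take r).length = r := by simp [List.length_take]; omega
  rw [hsplit, List.countP_append]
  have ht : (l.take r).countP p = (l.take r).length := by
    apply List.countP_eq_length.2
    intro a ha
    obtain ⟨j, hj, rfl⟩ := List.mem_iff_getElem.1 ha
    rw [List.getElem_take]
    exact h1 j (by omega) (by rw [hlt] at hj; omega)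
  have hd : (l.drop r).countP p = 0 := by
    apply List.countP_eq_zero.2
    intro a ha
    obtain ⟨j, hj, rfl⟩ := List.mem_iff_getElem.1 ha
    rw [List.getElem_drop]
    simp only [List.length_drop] at hj
    simp [h2 (r + j) (by omega) (by omega)]
  rw [ht, hd, hlt]
  omega

theorem bisectRight_eq_countP (l : List Int) (hs : l.Pairwise (· ≤ ·)) (v : Int) :
    PySem.List.bisectRight l v = l.countP (fun a => decide (a ≤ v)) := by
  obtain ⟨hle, hpre, hsuf⟩ := PySem.List.bisectRight_spec l v hs
  exact (countP_eq_of_split l _ _ hle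
    (fun j hj hjr => by simp [hpre j hj hjr])
    (fun j hj hjr => by simp only [decide_eq_false_iff_not, not_le]; exact hsuf j hj hjr)).symm

theorem bisectLeft_eq_countP (l : List Int) (hs : l.Pairwise (· ≤ ·)) (v : Int) :
    PySem.List.bisectLeft l v = l.countP (fun a => decide (a < v)) := by
  obtain ⟨hle, hpre, hsuf⟩ := PySem.List.bisectLeft_spec l v hs
  exact (countP_eq_of_split l _ _ hle
    (fun j hj hjr => by simp [hpre j hj hjr])
    (fun j hj hjr => by simp only [decide_eq_false_iff_not, not_lt]; exact hsuf j hj hjr)).symm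

-- Elements below v and elements at-or-above v partition the list.
theorem countP_lt_add_countP_ge (l : List Int) (v : Int) :
    l.countP (fun a => decide (a < v)) + l.countP (fun a => decide (v ≤ a)) = l.length := by
  induction l with
  | nil => rfl
  | cons x xs ih =>
    simp only [List.countP_cons, List.length_cons]
    by_cases h : x < v
    · have h2 : ¬ v ≤ x := not_le.2 h
      simp [h, h2]; omega
    · have h2 : v ≤ x := not_lt.1 h
      simp [h, h2]; omega

-- Per-axis sums of A's deltas as weighted counts, one lemma per sign case.
theorem sum_delta_pos (a1 a2 : Int) (h : 0 < a2 - a1) (l : List Int) :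
    (l.map (pvDelta a1 a2)).sum
      = (a2 - a1) * (l.countP (fun a => decide (a ≤ a1)) : Int)
        - (a2 - a1) * (l.countP (fun a => decide (a2 ≤ a)) : Int) := by
  have hd : ∀ v : Int, pvDelta a1 a2 v
      = if a2 ≤ v then -(a2 - a1) else if v ≤ a1 then (a2 - a1) else 0 := by
    intro v; unfold pvDelta pvAxisStep
    split_ifs <;> ring1
  induction l with
  | nil => simp
  | cons x xs ih =>
    simp only [List.map_cons, List.sum_cons, List.countP_cons, ih, hd x]
    by_cases c2 : a2 ≤ x
    · have c1 : ¬ x ≤ a1 := by omega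
      simp [c1, c2]; ring
    · by_cases c1 : x ≤ a1
      · simp [c1, c2]; ring
      · simp [c1, c2]

theorem sum_delta_neg (a1 a2 : Int) (h : a2 - a1 < 0) (l : List Int) :
    (l.map (pvDelta a1 a2)).sum
      = (a1 - a2) * (l.countP (fun a => decide (a1 ≤ a)) : Int)
        - (a1 - a2) * (l.countP (fun a => decide (a ≤ a2)) : Int) := by
  have hd : ∀ v : Int, pvDelta a1 a2 v
      = if v ≤ a2 then -(a1 - a2) else if a1 ≤ v then (a1 - a2) else 0 := by
    intro v; unfold pvDelta pvAxisStep
    split_ifs <;> first | ring1 | (exfalso; omega) | (rw [abs_of_neg (by omega)]; ring1)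
  induction l with
  | nil => simp
  | cons x xs ih =>
    simp only [List.map_cons, List.sum_cons, List.countP_cons, ih, hd x]
    by_cases c2 : x ≤ a2
    · have c1 : ¬ a1 ≤ x := by omega
      simp [c1, c2]; ring
    · by_cases c1 : a1 ≤ x
      · simp [c1, c2]; ring
      · simp [c1, c2]

theorem sum_delta_zero (a1 a2 : Int) (h : a2 - a1 = 0) (l : List Int) :
    (l.map (pvDelta a1 a2)).sum = 0 := by
  induction l with
  | nil => simp
  | cons x xs ih =>
    simp only [List.map_cons, List.sum_cons, ih]
    simp [pvDelta, pvAxisStep, h]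

-- Per-axis: the sum of A's deltas over a value list equals B's closed form on
-- the sorted list.
theorem sum_delta_eq_axisB (a1 a2 : Int) (l : List Int) :
    (l.map (pvDelta a1 a2)).sum
      = pvAxisB a1 a2 (PySem.List.sorted l (fun v => v) false) (l.length : Int) := by
  have hperm := PySem.List.sorted_perm l (fun v => v) false
  have hpair : (PySem.List.sorted l (fun v => v) false).Pairwise (· ≤ ·) :=
    PySem.List.sorted_pairwise l (fun v => v)
  have hc : ∀ p : Int → Bool,
      (PySem.List.sorted l (fun v => v) false).countP p = l.countP p :=
    fun p => hperm.countP_eq p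
  unfold pvAxisB
  rw [bisectRight_eq_countP _ hpair, bisectLeft_eq_countP _ hpair,
      bisectRight_eq_countP _ hpair, bisectLeft_eq_countP _ hpair, hc, hc, hc, hc]
  split_ifs with h1 h2
  · rw [sum_delta_pos a1 a2 h1 l]
    have := countP_lt_add_countP_ge l a2
    rw [show ((l.length : Int) - (l.countP (fun a => decide (a < a2)) : Int))
          = (l.countP (fun a => decide (a2 ≤ a)) : Int) from by omega]
    ring
  · rw [sum_delta_neg a1 a2 h2 l]
    have := countP_lt_add_countP_ge l a1
    rw [show ((l.length : Int) - (l.countP (fun a => decide (a < a1)) : Int))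
          = (l.countP (fun a => decide (a1 ≤ a)) : Int) from by omega]
    ring
  · exact sum_delta_zero a1 a2 (by omega) l

-- ===== VERDICT =====
theorem distance_change_spec : Claim_equal_distance_change := by
  intro x1 x2 y1 y2 people hdom
  unfold Spec_distance_change distance_change distance_change_alt
  rw [pvFold_eq_sum x1 x2 y1 y2 people 0, pvSum_split x1 x2 y1 y2 people]
  simp only [zero_add,
    sum_delta_eq_axisB x1 x2 (people.map (fun p => p.1)),
    sum_delta_eq_axisB y1 y2 (people.map (fun p => p.2)),
    List.length_map]
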